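-- pv_equiv track=rewrite | github.com/theofabrica/Narrations | app/narration_agent/writer_agent/strategy_finder/library_rag.py | _normalize_relaxed_with_index_map
-- ===== SOURCE A (Python) =====
-- from typing import Any, Dict, List, Optional, Tuple
--
-- def _normalize_relaxed_with_index_map(text: str) -> Tuple[str, List[int]]:
--     value = str(text or "")
--     out_chars: List[str] = []
--     index_map: List[int] = []
--     pending_space = False
--     for idx, char in enumerate(value):
--         if char.isalnum():
--             if pending_space and len(out_chars) > 0:
--                 out_chars.append(" ")
--                 index_map.append(idx)
--                 pending_space = False
--             out_chars.append(char.lower())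
--             index_map.append(idx)
--             continue
--         if char.isspace() or not char.isalnum():
--             pending_space = len(out_chars) > 0
--             continue
--     normalized = "".join(out_chars).strip()
--     if not normalized:
--         return "", []
--     left_trim = len("".join(out_chars)) - len("".join(out_chars).lstrip())
--     if left_trim > 0:
--         index_map = index_map[left_trim:]
--     right_trim = len("".join(out_chars)) - len("".join(out_chars).rstrip())
--     if right_trim > 0:
--         index_map = index_map[: len(index_map) - right_trim]
--     return normalized, index_map
-- ===== SOURCE B (Python) =====
-- from typing import List, Tuple
--
-- def _normalize_relaxed_with_index_map(text: str) -> Tuple[str, List[int]]: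
--     value = str(text or "")
--     # Phase 1: tokenize into maximal alnum runs (word chars lowered, with original indices).
--     words: List[Tuple[List[str], List[int]]] = []
--     cur_chars: List[str] = []
--     cur_idx: List[int] = []
--     for i, ch in enumerate(value):
--         if ch.isalnum():
--             cur_chars.append(ch.lower())
--             cur_idx.append(i)
--         elif cur_chars:
--             words.append((cur_chars, cur_idx))
--             cur_chars, cur_idx = [], []
--     if cur_chars:
--         words.append((cur_chars, cur_idx))
--     if not words:
--         return "", []
--     # Phase 2: join words with single spaces; a space carries the next word's first index.
--     out_chars = list(words[0][0])
--     index_map = list(words[0][1])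
--     for chars, idxs in words[1:]:
--         out_chars.append(" ")
--         index_map.append(idxs[0])
--         out_chars.extend(chars)
--         index_map.extend(idxs)
--     return "".join(out_chars), index_map
-- ===== Notes on version B (the rewrite author's own statement) =====
-- stated objective: simpler
-- what changed: A's single flag-driven loop (pending_space state machine plus a dead strip/left-trim/right-trim postprocessing pass) is re-decomposed into two plain phases: tokenize the text into maximal alnum-run words carrying their original indices, then join the words with single spaces whose index is the next word's first index; the provably no-op strip/trim code is dropped.
import Mathlib
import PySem

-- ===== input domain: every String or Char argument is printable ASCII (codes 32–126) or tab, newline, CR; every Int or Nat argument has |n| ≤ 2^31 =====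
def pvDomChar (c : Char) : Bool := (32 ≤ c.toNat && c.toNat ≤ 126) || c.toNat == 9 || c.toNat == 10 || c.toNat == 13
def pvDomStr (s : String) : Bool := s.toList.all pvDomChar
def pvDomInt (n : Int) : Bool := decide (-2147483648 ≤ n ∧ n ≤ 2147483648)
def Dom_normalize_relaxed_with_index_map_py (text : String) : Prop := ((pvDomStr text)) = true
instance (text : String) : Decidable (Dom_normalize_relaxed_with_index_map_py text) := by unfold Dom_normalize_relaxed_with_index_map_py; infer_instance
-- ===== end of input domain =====

-- B re-decomposes A's one flag-driven loop into tokenize-into-words then join-with-spaces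
-- (and drops A's provably no-op strip/trim postprocessing); objective: simpler, same cost.

-- ===== PORT A =====
-- loop state: (out_chars, index_map, pending_space); "".join of single-char strings is the char list itself
def pvLoopA : List (Int × Char) → List Char × List Int × Bool → List Char × List Int × Bool
  | [], st => st
  | (idx, char) :: rest, (out, im, pend) =>
    if PySem.Chars.isalnum char then
      let st2 := if pend && decide (0 < out.length) then (out ++ [' '], im ++ [idx], false)
                 else (out, im, pend)
      pvLoopA rest (st2.1 ++ [PySem.Chars.lowerChar char], st2.2.1 ++ [idx], st2.2.2)
    else
      if PySem.Chars.isspace char || !PySem.Chars.isalnum char then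
        pvLoopA rest (out, im, decide (0 < out.length))
      else
        pvLoopA rest (out, im, pend)

def normalize_relaxed_with_index_map_py (text : String) : String × List Int :=
  -- value = str(text or "") is text itself for a str argument ("" or "" == "")
  let st := pvLoopA (PySem.List.enumerate text.toList 0) ([], [], false)
  let out_chars := st.1
  let index_map := st.2.1
  let normalized := PySem.Chars.strip out_chars
  if normalized.isEmpty then ("", [])
  else
    let left_trim : Int := (out_chars.length : Int) - ((PySem.Chars.lstrip out_chars).length : Int)
    let index_map := if 0 < left_trim then PySem.List.slice index_map (some left_trim) none else index_map
    let right_trim : Int := (out_chars.length : Int) - ((PySem.Chars.rstrip out_chars).length : Int)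
    let index_map := if 0 < right_trim then PySem.List.slice index_map none (some ((index_map.length : Int) - right_trim)) else index_map
    (String.ofList normalized, index_map)

-- ===== PORT B =====
-- phase 1 of Source B: maximal alnum runs as (lowered chars, original indices) words
def pvTokB : List (Int × Char) → List Char → List Int → List (List Char × List Int) → List (List Char × List Int)
  | [], cur, curI, words => if cur.isEmpty then words else words ++ [(cur, curI)]
  | (i, ch) :: rest, cur, curI, words =>
    if PySem.Chars.isalnum ch then
      pvTokB rest (cur ++ [PySem.Chars.lowerChar ch]) (curI ++ [i]) words
    else if cur.isEmpty then
      pvTokB rest cur curI words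
    else
      pvTokB rest [] [] (words ++ [(cur, curI)])

-- phase 2 of Source B: join words with ' '; `idxs[0]` ported as headD 0 (word index lists are
-- nonempty by construction, so this is exact)
def pvJoinB (ws : List (List Char × List Int)) (acc : List Char × List Int) : List Char × List Int :=
  ws.foldl (fun acc wi => (acc.1 ++ ' ' :: wi.1, acc.2 ++ wi.2.headD 0 :: wi.2)) acc

def normalize_relaxed_with_index_map_py_alt (text : String) : String × List Int :=
  match pvTokB (PySem.List.enumerate text.toList 0) [] [] [] with
  | [] => ("", [])
  | w :: ws =>
    let r := pvJoinB ws (w.1, w.2)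
    (String.ofList r.1, r.2)

-- ===== PRECONDITION & SPEC =====
def Spec_normalize_relaxed_with_index_map_py (text : String) (out : String × List Int) : Prop := out = normalize_relaxed_with_index_map_py_alt text
instance (text : String) (out : String × List Int) : Decidable (Spec_normalize_relaxed_with_index_map_py text out) := by unfold Spec_normalize_relaxed_with_index_map_py; infer_instance

-- ===== CLAIM (what is proved, stated in full; the proofs are below) =====
def Claim_equal_normalize_relaxed_with_index_map_py : Prop := ∀ (text : String), Dom_normalize_relaxed_with_index_map_py text → Spec_normalize_relaxed_with_index_map_py text (normalize_relaxed_with_index_map_py text)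

-- ===== LEMMAS AND PROOFS =====

theorem charLe_toNat {a b : Char} (h : a ≤ b) : a.toNat ≤ b.toNat := Fin.mk_le_mk.mp h

theorem alnum_lower_not_space (c : Char) (h : PySem.Chars.isalnum c = true) :
    PySem.Chars.isspace (PySem.Chars.lowerChar c) = false := by
  simp only [PySem.Chars.isalnum, PySem.Chars.isalpha, PySem.Chars.isupper, PySem.Chars.islower,
    PySem.Chars.isdigit, Bool.or_eq_true, Bool.and_eq_true, decide_eq_true_eq] at h
  have eA : ('A').toNat = 65 := rfl
  have eZ : ('Z').toNat = 90 := rfl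
  have ea : ('a').toNat = 97 := rfl
  have ez : ('z').toNat = 122 := rfl
  have e0 : ('0').toNat = 48 := rfl
  have e9 : ('9').toNat = 57 := rfl
  have key : (48 ≤ (PySem.Chars.lowerChar c).toNat ∧ (PySem.Chars.lowerChar c).toNat ≤ 57) ∨
      (97 ≤ (PySem.Chars.lowerChar c).toNat ∧ (PySem.Chars.lowerChar c).toNat ≤ 122) := by
    simp only [PySem.Chars.lowerChar, PySem.Chars.isupper]
    split
    · rename_i hu
      simp only [Bool.and_eq_true, decide_eq_true_eq] at hu
      have h1 := charLe_toNat hu.1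
      have h2 := charLe_toNat hu.2
      have hv : (c.toNat + 32) < 55296 := by omega
      have heq : (Char.ofNat (c.toNat + 32)).toNat = c.toNat + 32 := by
        unfold Char.ofNat; rw [dif_pos (Or.inl hv)]; rfl
      rw [heq]
      right; omega
    · rename_i hu
      rcases h with (⟨hA, hZ⟩ | ⟨ha, hz⟩) | ⟨h0, h9⟩
      · exact absurd (by simp only [Bool.and_eq_true, decide_eq_true_eq]; exact ⟨hA, hZ⟩) hu
      · right; exact ⟨by have := charLe_toNat ha; omega, by have := charLe_toNat hz; omega⟩
      · left; exact ⟨by have := charLe_toNat h0; omega, by have := charLe_toNat h9; omega⟩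
  simp only [PySem.Chars.isspace, Bool.or_eq_false_iff, Bool.and_eq_false_iff,
    decide_eq_false_iff_not]
  omega

-- the characters of a word list, joined with single spaces (the normalized text)
def wOut : List (List Char × List Int) → List Char
  | [] => []
  | w :: ws => w.1 ++ ws.flatMap (fun wi => ' ' :: wi.1)

-- the index map of a word list (each later word contributes its first index for the space)
def wIm : List (List Char × List Int) → List Int
  | [] => []
  | w :: ws => w.2 ++ ws.flatMap (fun wi => wi.2.headD 0 :: wi.2)

-- every word has nonempty chars, all non-space
def Good (ws : List (List Char × List Int)) : Prop :=
  ∀ w ∈ ws, w.1 ≠ [] ∧ ∀ c ∈ w.1, PySem.Chars.isspace c = false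

-- A's loop state as determined by B's tokenizer state
def stateOf (words : List (List Char × List Int)) (cur : List Char) (curI : List Int) :
    List Char × List Int × Bool :=
  if cur = [] then (wOut words, wIm words, decide (words ≠ []))
  else (wOut (words ++ [(cur, curI)]), wIm (words ++ [(cur, curI)]), false)

theorem wOut_append (ws : List (List Char × List Int)) (a : List Char) (b : List Int) :
    wOut (ws ++ [(a, b)]) = if ws = [] then a else wOut ws ++ ' ' :: a := by
  cases ws with
  | nil => simp [wOut]
  | cons w ws => simp [wOut, List.flatMap_append]

theorem wIm_append (ws : List (List Char × List Int)) (a : List Char) (b : List Int) :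
    wIm (ws ++ [(a, b)]) = if ws = [] then b else wIm ws ++ b.headD 0 :: b := by
  cases ws with
  | nil => simp [wIm]
  | cons w ws => simp [wIm, List.flatMap_append]

theorem wOut_ne_nil (ws : List (List Char × List Int)) (h : Good ws) (hne : ws ≠ []) :
    wOut ws ≠ [] := by
  cases ws with
  | nil => exact absurd rfl hne
  | cons w ws =>
    have := (h w (by simp)).1
    simp [wOut]
    intro hc; exact absurd hc this

theorem good_append (ws : List (List Char × List Int)) (a : List Char) (b : List Int)
    (h : Good ws) (ha : a ≠ []) (hs : ∀ c ∈ a, PySem.Chars.isspace c = false) :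
    Good (ws ++ [(a, b)]) := by
  intro w hw
  rcases List.mem_append.mp hw with h1 | h2
  · exact h w h1
  · simp at h2; subst h2; exact ⟨ha, hs⟩

theorem headD_append_of_ne_nil (l : List Int) (x d : Int) (h : l ≠ []) :
    (l ++ [x]).headD d = l.headD d := by
  cases l with
  | nil => exact absurd rfl h
  | cons a t => rfl

-- the main simulation invariant: A's loop from a tokenizer-shaped state lands on the
-- rendered output of B's tokenizer
theorem loopA_eq_tok : ∀ (l : List (Int × Char)) (words : List (List Char × List Int))
    (cur : List Char) (curI : List Int),
    cur.length = curI.length →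
    (∀ c ∈ cur, PySem.Chars.isspace c = false) →
    Good words →
    (pvLoopA l (stateOf words cur curI)).1 = wOut (pvTokB l cur curI words) ∧
    (pvLoopA l (stateOf words cur curI)).2.1 = wIm (pvTokB l cur curI words) := by
  intro l
  induction l with
  | nil =>
    intro words cur curI hlen hcs hg
    by_cases hc : cur = []
    · subst hc
      simp [pvLoopA, pvTokB, stateOf]
    · simp [pvLoopA, pvTokB, stateOf, hc, List.isEmpty_eq_false_iff.mpr hc]
  | cons p rest ih =>
    obtain ⟨i, c⟩ := p
    intro words cur curI hlen hcs hg
    have hlc : ∀ x ∈ cur ++ [PySem.Chars.lowerChar c], PySem.Chars.isalnum c = true →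
        PySem.Chars.isspace x = false := by
      intro x hx ha
      rcases List.mem_append.mp hx with h1 | h2
      · exact hcs x h1
      · simp at h2; subst h2; exact alnum_lower_not_space c ha
    by_cases ha : PySem.Chars.isalnum c = true
    · by_cases hc : cur = []
      · subst hc
        have hcurI : curI = [] := by cases curI <;> simp_all
        subst hcurI
        by_cases hw : words = []
        · subst hw
          have e1 : pvLoopA ((i, c) :: rest) (stateOf [] [] []) =
              pvLoopA rest (stateOf [] [PySem.Chars.lowerChar c] [i]) := by
            simp [pvLoopA, stateOf, ha, wOut, wIm]
          have e2 : pvTokB ((i, c) :: rest) [] [] [] =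
              pvTokB rest [PySem.Chars.lowerChar c] [i] [] := by
            simp [pvTokB, ha]
          rw [e1, e2]
          exact ih [] [PySem.Chars.lowerChar c] [i] (by simp)
            (by intro x hx; exact hlc x (by simpa using hx) ha) (by intro w hw; simp at hw)
        · have hwne := wOut_ne_nil words hg hw
          have e1 : pvLoopA ((i, c) :: rest) (stateOf words [] []) =
              pvLoopA rest (stateOf words [PySem.Chars.lowerChar c] [i]) := by
            simp [pvLoopA, stateOf, ha, hw, List.length_pos_iff.mpr hwne,
              wOut_append, wIm_append]
          have e2 : pvTokB ((i, c) :: rest) [] [] words =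
              pvTokB rest [PySem.Chars.lowerChar c] [i] words := by
            simp [pvTokB, ha]
          rw [e1, e2]
          exact ih words [PySem.Chars.lowerChar c] [i] (by simp)
            (by intro x hx; exact hlc x (by simpa using hx) ha) hg
      · have hcurI : curI ≠ [] := by cases curI <;> simp_all
        have e1 : pvLoopA ((i, c) :: rest) (stateOf words cur curI) =
            pvLoopA rest (stateOf words (cur ++ [PySem.Chars.lowerChar c]) (curI ++ [i])) := by
          simp only [stateOf, if_neg hc, if_neg (by simp : ¬(cur ++ [PySem.Chars.lowerChar c] = []))]
          simp only [pvLoopA, ha, Bool.false_and]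
          rw [wOut_append, wOut_append, wIm_append, wIm_append,
            headD_append_of_ne_nil curI i 0 hcurI]
          by_cases hw : words = [] <;> simp [hw]
        have e2 : pvTokB ((i, c) :: rest) cur curI words =
            pvTokB rest (cur ++ [PySem.Chars.lowerChar c]) (curI ++ [i]) words := by
          simp [pvTokB, ha]
        rw [e1, e2]
        exact ih words (cur ++ [PySem.Chars.lowerChar c]) (curI ++ [i]) (by simp [hlen])
          (fun x hx => hlc x hx ha) hg
    · have ha' : PySem.Chars.isalnum c = false := by simpa using ha
      by_cases hc : cur = []
      · subst hc
        have hcurI : curI = [] := by cases curI <;> simp_all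
        subst hcurI
        have e1 : pvLoopA ((i, c) :: rest) (stateOf words [] []) =
            pvLoopA rest (stateOf words [] []) := by
          by_cases hw : words = []
          · simp [pvLoopA, stateOf, ha', hw, wOut]
          · have hwne := wOut_ne_nil words hg hw
            simp [pvLoopA, stateOf, ha', hw, List.length_pos_iff.mpr hwne]
        have e2 : pvTokB ((i, c) :: rest) [] [] words = pvTokB rest [] [] words := by
          simp [pvTokB, ha']
        rw [e1, e2]
        exact ih words [] [] rfl (by simp) hg
      · have hW' : Good (words ++ [(cur, curI)]) := good_append words cur curI hg hc hcs
        have hne : wOut (words ++ [(cur, curI)]) ≠ [] :=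
          wOut_ne_nil _ hW' (by simp)
        have e1 : pvLoopA ((i, c) :: rest) (stateOf words cur curI) =
            pvLoopA rest (stateOf (words ++ [(cur, curI)]) [] []) := by
          simp [pvLoopA, stateOf, ha', hc, List.length_pos_iff.mpr hne]
        have e2 : pvTokB ((i, c) :: rest) cur curI words =
            pvTokB rest [] [] (words ++ [(cur, curI)]) := by
          simp [pvTokB, ha', List.isEmpty_eq_false_iff.mpr hc]
        rw [e1, e2]
        exact ih (words ++ [(cur, curI)]) [] [] rfl (by simp) hW'

theorem tok_good : ∀ (l : List (Int × Char)) (cur : List Char) (curI : List Int)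
    (words : List (List Char × List Int)),
    (∀ c ∈ cur, PySem.Chars.isspace c = false) → Good words →
    Good (pvTokB l cur curI words) := by
  intro l
  induction l with
  | nil =>
    intro cur curI words hcs hg
    by_cases hc : cur = []
    · simp [pvTokB, hc, hg]
    · simp only [pvTokB, List.isEmpty_eq_false_iff.mpr hc, if_neg Bool.false_ne_true]
      exact good_append words cur curI hg hc hcs
  | cons p rest ih =>
    obtain ⟨i, c⟩ := p
    intro cur curI words hcs hg
    by_cases ha : PySem.Chars.isalnum c = true
    · simp only [pvTokB, ha]
      refine ih _ _ _ ?_ hg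
      intro x hx
      rcases List.mem_append.mp hx with h1 | h2
      · exact hcs x h1
      · simp at h2; subst h2; exact alnum_lower_not_space c ha
    · have ha' : PySem.Chars.isalnum c = false := by simpa using ha
      by_cases hc : cur = []
      · rw [show pvTokB ((i, c) :: rest) cur curI words = pvTokB rest cur curI words from by
          simp [pvTokB, ha', hc]]
        exact ih cur curI words hcs hg
      · rw [show pvTokB ((i, c) :: rest) cur curI words =
            pvTokB rest [] [] (words ++ [(cur, curI)]) from by
          simp [pvTokB, ha', List.isEmpty_eq_false_iff.mpr hc]]
        exact ih [] [] (words ++ [(cur, curI)]) (by simp)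
          (good_append words cur curI hg hc hcs)

theorem lstrip_noop (xs : List Char) (h : ∀ c, xs.head? = some c → PySem.Chars.isspace c = false) :
    PySem.Chars.lstrip xs = xs := by
  cases xs with
  | nil => rfl
  | cons c t =>
    simp [PySem.Chars.lstrip, h c rfl]

theorem rstrip_noop (xs : List Char) (h : ∀ c, xs.getLast? = some c → PySem.Chars.isspace c = false) :
    PySem.Chars.rstrip xs = xs := by
  cases hr : xs.reverse with
  | nil => simp [List.reverse_eq_nil_iff.mp hr, PySem.Chars.rstrip]
  | cons c t =>
    have hl : xs.getLast? = some c := by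
      rw [← List.head?_reverse, hr]; rfl
    have hc : PySem.Chars.isspace c = false := h c hl
    unfold PySem.Chars.rstrip
    rw [hr, List.dropWhile_cons]
    simp only [hc, if_neg Bool.false_ne_true]
    rw [← hr, List.reverse_reverse]

theorem pvJoinB_eq : ∀ (ws : List (List Char × List Int)) (a : List Char) (b : List Int),
    pvJoinB ws (a, b) = (a ++ ws.flatMap (fun wi => ' ' :: wi.1),
                         b ++ ws.flatMap (fun wi => wi.2.headD 0 :: wi.2)) := by
  intro ws
  induction ws with
  | nil => simp [pvJoinB]
  | cons w ws ih => intro a b; simp [pvJoinB, List.foldl_cons] at ih ⊢; rw [ih]; simp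

-- ===== VERDICT (by name: the statement is the Claim_ definition above) =====
theorem wOut_getLast_not_space (W : List (List Char × List Int)) (hg : Good W)
    (c : Char) (h : (wOut W).getLast? = some c) : PySem.Chars.isspace c = false := by
  rcases List.eq_nil_or_concat' W with hW | ⟨ws', lst, hW⟩
  · subst hW; simp [wOut] at h
  · subst hW
    have hlst : lst.1 ≠ [] ∧ ∀ x ∈ lst.1, PySem.Chars.isspace x = false :=
      hg lst (by simp)
    rw [show ws' ++ [lst] = ws' ++ [(lst.1, lst.2)] from by simp, wOut_append] at h
    have hmem : c ∈ lst.1 := by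
      by_cases hws : ws' = []
      · rw [if_pos hws] at h
        exact List.mem_of_getLast? h
      · rw [if_neg hws, List.getLast?_append_of_ne_nil _ (by simp),
          show (' ' :: lst.1) = [' '] ++ lst.1 from rfl,
          List.getLast?_append_of_ne_nil _ hlst.1] at h
        exact List.mem_of_getLast? h
    exact hlst.2 c hmem

theorem normalize_relaxed_with_index_map_py_spec : Claim_equal_normalize_relaxed_with_index_map_py := by
  intro text _
  unfold Spec_normalize_relaxed_with_index_map_py
  have hmain := loopA_eq_tok (PySem.List.enumerate text.toList 0) [] [] [] rfl
    (by intro x hx; simp at hx) (by intro w hw; simp at hw)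
  have hgW := tok_good (PySem.List.enumerate text.toList 0) [] [] []
    (by intro x hx; simp at hx) (by intro w hw; simp at hw)
  rw [show stateOf [] [] [] = ([], [], false) from by simp [stateOf, wOut, wIm]] at hmain
  obtain ⟨h1, h2⟩ := hmain
  simp only [normalize_relaxed_with_index_map_py, normalize_relaxed_with_index_map_py_alt]
  cases hW : pvTokB (PySem.List.enumerate text.toList 0) [] [] [] with
  | nil =>
    rw [hW] at h1 h2
    simp only [wOut] at h1
    simp [h1, PySem.Chars.strip, PySem.Chars.lstrip, PySem.Chars.rstrip]
  | cons w ws =>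
    rw [hW] at h1 h2 hgW
    have hout_ne : wOut (w :: ws) ≠ [] := wOut_ne_nil _ hgW (by simp)
    have hl : PySem.Chars.lstrip (wOut (w :: ws)) = wOut (w :: ws) := by
      apply lstrip_noop
      intro c hc
      have hw1 := hgW w (by simp)
      cases hw1h : w.1 with
      | nil => exact absurd hw1h hw1.1
      | cons a u =>
        have : (wOut (w :: ws)).head? = some a := by
          simp [wOut, hw1h]
        rw [this] at hc
        exact hw1.2 c (by injection hc with hc; subst hc; simp [hw1h])
    have hr : PySem.Chars.rstrip (wOut (w :: ws)) = wOut (w :: ws) := by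
      apply rstrip_noop
      intro c hc
      exact wOut_getLast_not_space _ hgW c hc
    have hs : PySem.Chars.strip (wOut (w :: ws)) = wOut (w :: ws) := by
      rw [PySem.Chars.strip, hl, hr]
    rw [h1, h2, hs, hl, hr]
    have hpj : pvJoinB ws (w.1, w.2) = (wOut (w :: ws), wIm (w :: ws)) := by
      rw [pvJoinB_eq]; simp [wOut, wIm]
    simp [List.isEmpty_eq_false_iff.mpr hout_ne, hpj]
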